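-- pv_equiv track=rewrite | github.com/Yacinewhatchandcode/Sovereign-Ecosystem | azirem_agents/external/autonomous_cleanup_agent.py | _remove_dead_code
-- ===== SOURCE A (Python) =====
-- def _remove_dead_code(content: str) -> str:
--     """Remove obviously dead code (commented out blocks, etc.)"""
--     lines = content.splitlines(keepends=True)
--     new_lines = []
--     skip_block = False
--
--     for i, line in enumerate(lines):
--         # Skip large commented blocks (more than 5 lines)
--         if line.strip().startswith('#') and i < len(lines) - 1:
--             # Check if next few lines are also comments
--             comment_count = 0
--             for j in range(i, min(i + 6, len(lines))):
--                 if lines[j].strip().startswith('#') or lines[j].strip() == '':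
--                     comment_count += 1
--             if comment_count >= 5:
--                 skip_block = True
--                 continue
--
--         if not skip_block:
--             new_lines.append(line)
--         elif line.strip() == '':
--             skip_block = False
--
--     return ''.join(new_lines)
-- ===== SOURCE B (Python) =====
-- def _remove_dead_code(content: str) -> str:
--     """Remove obviously dead code (commented out blocks, etc.)"""
--     lines = content.splitlines(keepends=True)
--     n = len(lines)
--
--     def heads_dead_block(i):
--         # a comment line (not the last line) opening a window with >=5 comment/blank lines
--         if not lines[i].strip().startswith('#') or i + 1 >= n:
--             return False
--         window = [l.strip() for l in lines[i:i + 6]]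
--         return sum(1 for w in window if w.startswith('#') or w == '') >= 5
--
--     # pass 1: chop the file into segments, each ending with its blank line
--     segments, cur = [], []
--     for i in range(n):
--         cur.append(i)
--         if lines[i].strip() == '':
--             segments.append(cur)
--             cur = []
--     if cur:
--         segments.append(cur)
--
--     # pass 2: truncate every segment at its first dead-block head
--     out = []
--     for seg in segments:
--         for i in seg:
--             if heads_dead_block(i):
--                 break
--             out.append(lines[i])
--     return ''.join(out)
-- ===== Notes on version B (the rewrite author's own statement) =====
-- stated objective: alternative
-- what changed: Replaces A's single-pass skip_block state machine by a staged decomposition: first chop the file into blank-terminated segments, then truncate each segment at its first dead-block head line and concatenate.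
import Mathlib
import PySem

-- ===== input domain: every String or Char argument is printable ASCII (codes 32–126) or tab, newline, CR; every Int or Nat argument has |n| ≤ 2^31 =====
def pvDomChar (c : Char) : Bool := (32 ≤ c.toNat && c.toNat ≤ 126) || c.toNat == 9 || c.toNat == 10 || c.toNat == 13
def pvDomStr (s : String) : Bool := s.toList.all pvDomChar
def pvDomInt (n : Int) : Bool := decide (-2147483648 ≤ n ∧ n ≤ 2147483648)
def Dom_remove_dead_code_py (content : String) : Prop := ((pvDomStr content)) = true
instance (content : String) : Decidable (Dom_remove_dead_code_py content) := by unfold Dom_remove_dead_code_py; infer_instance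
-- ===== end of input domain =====

-- B replaces A's skip_block state machine by a staged decomposition: pass 1 chops the file into
-- blank-terminated segments, pass 2 truncates each segment at its first dead-block head line
-- (objective: alternative decomposition; same cost).

-- shared library helper: Python str.splitlines(keepends=True), hand-ported; exact on the ASCII
-- domain, where the only line breaks are '\n', '\r' and '\r\n'.
def splitKeep (cur : List Char) : List Char → List (List Char)
  | [] => if cur.isEmpty then [] else [cur]
  | '\r' :: '\n' :: rest => (cur ++ ['\r', '\n']) :: splitKeep [] rest
  | '\r' :: rest => (cur ++ ['\r']) :: splitKeep [] rest
  | '\n' :: rest => (cur ++ ['\n']) :: splitKeep [] rest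
  | c :: rest => splitKeep (cur ++ [c]) rest
termination_by cs => cs.length
decreasing_by all_goals simp

-- ===== PORT A =====
def remove_dead_code_py (content : String) : String :=
  let lines := splitKeep [] content.toList
  let n : Int := lines.length
  let res := (PySem.List.enumerate lines 0).foldl
    (fun (st : List (List Char) × Bool) (p : Int × List Char) =>
      let i := p.1
      let line := p.2
      -- the tail of the loop body ('if not skip_block … elif …'), reached when no 'continue' fires
      let tail := fun (st : List (List Char) × Bool) =>
        if !st.2 then (st.1 ++ [line], st.2)
        else if PySem.Chars.strip line == ([] : List Char) then (st.1, false)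
        else st
      if PySem.Chars.startswith (PySem.Chars.strip line) ['#'] && decide (i < n - 1) then
        let cnt := (PySem.List.pyRange i (min (i + 6) n) 1).foldl
          (fun c j =>
            -- lines[j].strip(), indexed twice as in the Python; j is always in range here
            if PySem.Chars.startswith (PySem.Chars.strip (PySem.List.pyGetD lines j [])) ['#']
               || PySem.Chars.strip (PySem.List.pyGetD lines j []) == ([] : List Char)
            then c + 1 else c)
          (0 : Int)
        if 5 ≤ cnt then (st.1, true) else tail st
      else tail st)
    (([] : List (List Char)), false)
  String.ofList (PySem.Chars.join [] res.1)

-- ===== PORT B =====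
-- Source B's helper heads_dead_block(i): a comment line (not the last) opening a window whose
-- stripped lines contain >= 5 comments/blanks
def headsDead (lines : List (List Char)) (i : Nat) : Bool :=
  if !(PySem.Chars.startswith (PySem.Chars.strip (lines.getD i [])) ['#']) || i + 1 ≥ lines.length
  then false
  else
    decide (5 ≤ ((PySem.List.slice lines (some (i : Int)) (some ((i : Int) + 6))).map
      PySem.Chars.strip).countP (fun w => PySem.Chars.startswith w ['#'] || w == ([] : List Char)))

def remove_dead_code_py_alt (content : String) : String :=
  let lines := splitKeep [] content.toList
  let n := lines.length
  -- pass 1: chop the file into segments of line indices, each ending with its blank line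
  let st := (List.range n).foldl
    (fun (st : List (List Nat) × List Nat) i =>
      let cur := st.2 ++ [i]
      if PySem.Chars.strip (lines.getD i []) == ([] : List Char) then (st.1 ++ [cur], ([] : List Nat))
      else (st.1, cur))
    (([] : List (List Nat)), ([] : List Nat))
  let segments := if st.2.isEmpty then st.1 else st.1 ++ [st.2]
  -- pass 2: truncate every segment at its first dead-block head and collect the lines
  let res := segments.foldl
    (fun (out : List (List Char)) (seg : List Nat) =>
      out ++ (seg.takeWhile (fun i => !headsDead lines i)).map (fun i => lines.getD i []))
    ([] : List (List Char))
  String.ofList (PySem.Chars.join [] res)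

-- ===== PRECONDITION & SPEC =====
def Spec_remove_dead_code_py (content : String) (out : String) : Prop := out = remove_dead_code_py_alt content
instance (content : String) (out : String) : Decidable (Spec_remove_dead_code_py content out) := by unfold Spec_remove_dead_code_py; infer_instance

-- ===== CLAIM (what is proved, stated in full; the proofs are below) =====
def Claim_equal_remove_dead_code_py : Prop := ∀ (content : String), Dom_remove_dead_code_py content → Spec_remove_dead_code_py content (remove_dead_code_py content)

-- ===== LEMMAS AND PROOFS =====

-- blank line test, named for the proofs (definitionally the port's inline test)
def blankI (lines : List (List Char)) (i : Nat) : Bool :=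
  PySem.Chars.strip (lines.getD i []) == ([] : List Char)

-- canonical trigger condition (proof device; equal to headsDead, see headsDead_eq)
def cbB (l : List Char) : Bool :=
  let s := PySem.Chars.strip l
  PySem.Chars.startswith s ['#'] || s == ([] : List Char)

def trigB (lines : List (List Char)) (i : Nat) : Bool :=
  if !(PySem.Chars.startswith (PySem.Chars.strip (lines.getD i [])) ['#']) || i + 1 ≥ lines.length
  then false
  else decide (5 ≤ (PySem.List.slice lines (some (i : Int)) (some ((i : Int) + 6))).countP cbB)

theorem headsDead_eq (lines : List (List Char)) (i : Nat) :
    headsDead lines i = trigB lines i := by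
  unfold headsDead trigB
  rw [List.countP_map]
  rfl

-- A's fold step, named (a proof device; definitionally the lambda inside remove_dead_code_py)
def stepA (lines : List (List Char)) (st : List (List Char) × Bool) (p : Int × List Char) :
    List (List Char) × Bool :=
  if PySem.Chars.startswith (PySem.Chars.strip p.2) ['#'] && decide (p.1 < (lines.length : Int) - 1) then
    if 5 ≤ (PySem.List.pyRange p.1 (min (p.1 + 6) (lines.length : Int)) 1).foldl
        (fun c j =>
          if PySem.Chars.startswith (PySem.Chars.strip (PySem.List.pyGetD lines j [])) ['#']
             || PySem.Chars.strip (PySem.List.pyGetD lines j []) == ([] : List Char)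
          then c + 1 else c)
        (0 : Int)
    then (st.1, true)
    else if !st.2 then (st.1 ++ [p.2], st.2)
      else if PySem.Chars.strip p.2 == ([] : List Char) then (st.1, false) else st
  else if !st.2 then (st.1 ++ [p.2], st.2)
    else if PySem.Chars.strip p.2 == ([] : List Char) then (st.1, false) else st

-- A's loop, rewritten as a recursion over the index (proof device)
def aRec (lines : List (List Char)) (skip : Bool) (i : Nat) : List (List Char) :=
  if h : i < lines.length then
    if trigB lines i then aRec lines true (i + 1)
    else if !skip then lines.getD i [] :: aRec lines skip (i + 1)
    else if blankI lines i then aRec lines false (i + 1)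
    else aRec lines skip (i + 1)
  else []
termination_by lines.length - i
decreasing_by all_goals omega

theorem startswith_hash_ne_nil (s : List Char)
    (h : PySem.Chars.startswith s ['#'] = true) : s ≠ ([] : List Char) := by
  intro hnil
  subst hnil
  rw [PySem.Chars.startswith_iff] at h
  simp at h

-- B's trigger, written as one conjunction
theorem trigB_eq (lines : List (List Char)) (i : Nat) :
    trigB lines i = ((PySem.Chars.startswith (PySem.Chars.strip (lines.getD i [])) ['#']
        && decide (i + 1 < lines.length))
      && decide (5 ≤ ((lines.drop i).take 6).countP cbB)) := by
  unfold trigB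
  rw [show ((i : Int) + 6) = ((i : Int) + ((6 : Nat) : Int)) by norm_num]
  rw [PySem.List.slice_natCast_add]
  split
  · rename_i hg
    rw [Bool.or_eq_true] at hg
    rcases hg with hg | hg
    · rw [Bool.not_eq_true'] at hg
      rw [hg]
      simp
    · rw [decide_eq_true_eq] at hg
      rw [show decide (i + 1 < lines.length) = false by simp; omega]
      simp
  · rename_i hg
    rw [Bool.or_eq_true, not_or] at hg
    have h1 : PySem.Chars.startswith (PySem.Chars.strip (lines.getD i [])) ['#'] = true := by
      have := hg.1; simpa using this
    have h2 : i + 1 < lines.length := by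
      have := hg.2; simpa using this
    rw [h1, show decide (i + 1 < lines.length) = true by simp; omega]
    simp

theorem trigB_blank_false (lines : List (List Char)) (i : Nat) (h : trigB lines i = true) :
    blankI lines i = false := by
  rw [trigB_eq] at h
  rw [Bool.and_eq_true, Bool.and_eq_true] at h
  have := startswith_hash_ne_nil _ h.1.1
  unfold blankI
  simpa using this

theorem blank_trigB_false (lines : List (List Char)) (i : Nat) (h : blankI lines i = true) :
    trigB lines i = false := by
  by_cases ht : trigB lines i = true
  · rw [trigB_blank_false lines i ht] at h
    exact absurd h (by simp)
  · exact Bool.not_eq_true _ |>.mp ht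

-- a 0/1-counting foldl over an index range is a countP over the corresponding sublist
theorem countAux (P : List Char → Bool) (lines : List (List Char)) :
    ∀ (k a : Nat) (c0 : Int), a + k ≤ lines.length →
      (PySem.List.pyRange (a : Int) ((a : Int) + (k : Int)) 1).foldl
        (fun c j => if P (PySem.List.pyGetD lines j []) then c + 1 else c) c0
      = c0 + (((lines.drop a).take k).countP P : Int) := by
  intro k
  induction k with
  | zero =>
    intro a c0 h
    rw [show ((a : Int) + ((0 : Nat) : Int)) = (a : Int) by push_cast; ring]
    rw [PySem.List.pyRange_one_eq_nil (le_refl _)]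
    simp
  | succ k ih =>
    intro a c0 h
    rw [PySem.List.pyRange_one_cons (by push_cast; omega)]
    rw [List.foldl_cons]
    rw [show ((a : Int) + ((k + 1 : Nat) : Int)) = (((a + 1 : Nat) : Int) + (k : Int)) by
      push_cast; ring]
    rw [show ((a : Int) + 1) = ((a + 1 : Nat) : Int) by push_cast; ring]
    rw [ih (a + 1) _ (by omega)]
    rw [PySem.List.pyGetD_natCast, List.getD_eq_getElem lines [] (show a < lines.length by omega)]
    rw [show lines.drop a = lines[a] :: lines.drop (a + 1) from
      List.drop_eq_getElem_cons (by omega)]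
    rw [List.take_succ_cons, List.countP_cons]
    by_cases hp : P lines[a] = true
    · rw [if_pos hp, if_pos hp]; push_cast; ring
    · rw [if_neg hp, if_neg hp]; push_cast; ring

-- the inner comment-count of A equals a countP over the 6-line window
theorem cnt_eq (lines : List (List Char)) (i : Nat) (hi : i < lines.length) :
    (PySem.List.pyRange (i : Int) (min ((i : Int) + 6) (lines.length : Int)) 1).foldl
      (fun c j =>
        if PySem.Chars.startswith (PySem.Chars.strip (PySem.List.pyGetD lines j [])) ['#']
           || PySem.Chars.strip (PySem.List.pyGetD lines j []) == ([] : List Char)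
        then c + 1 else c)
      (0 : Int)
    = (((lines.drop i).take 6).countP cbB : Int) := by
  rw [show min ((i : Int) + 6) (lines.length : Int)
      = (i : Int) + ((min 6 (lines.length - i) : Nat) : Int) by push_cast; omega]
  have h := countAux cbB lines (min 6 (lines.length - i)) i 0 (by omega)
  rw [zero_add] at h
  have htake : (lines.drop i).take (min 6 (lines.length - i)) = (lines.drop i).take 6 := by
    rcases Nat.lt_or_ge (lines.length - i) 6 with h6 | h6
    · have hlen : (lines.drop i).length = lines.length - i := List.length_drop
      rw [show min 6 (lines.length - i) = lines.length - i by omega]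
      rw [List.take_of_length_le (by omega), List.take_of_length_le (by omega)]
    · rw [show min 6 (lines.length - i) = 6 by omega]
  rw [htake] at h
  exact h

-- A's step function, characterised through trigB
theorem stepA_eq (lines : List (List Char)) (i : Nat) (hi : i < lines.length)
    (acc : List (List Char)) (skip : Bool) :
    stepA lines (acc, skip) ((i : Int), lines.getD i []) =
      (if trigB lines i then (acc, true)
       else if !skip then (acc ++ [lines.getD i []], skip)
       else if PySem.Chars.strip (lines.getD i []) == ([] : List Char) then (acc, false)
       else (acc, skip)) := by
  unfold stepA
  simp only []
  rw [trigB_eq lines i]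
  rw [cnt_eq lines i hi]
  by_cases h1 : PySem.Chars.startswith (PySem.Chars.strip (lines.getD i [])) ['#'] = true
  · by_cases h2 : i + 1 < lines.length
    · have hd : decide ((i : Int) < (lines.length : Int) - 1) = true := by simp; omega
      have hd2 : decide (i + 1 < lines.length) = true := by simp [h2]
      by_cases h3 : (5 : Int) ≤ ((((lines.drop i).take 6).countP cbB) : Int)
      · have h3' : decide (5 ≤ ((lines.drop i).take 6).countP cbB) = true := by simp; omega
        rw [h1, hd, hd2, h3']
        simp only [Bool.and_self]
        rw [if_pos (by trivial), if_pos h3, if_pos (by trivial)]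
      · have h3' : decide (5 ≤ ((lines.drop i).take 6).countP cbB) = false := by
          simp only [decide_eq_false_iff_not, not_le]
          omega
        rw [h1, hd, hd2, h3']
        simp only [Bool.and_self, Bool.and_false, Bool.false_eq_true, if_false]
        rw [if_pos (by trivial), if_neg h3]
    · have hd : decide ((i : Int) < (lines.length : Int) - 1) = false := by
        simp only [decide_eq_false_iff_not, not_lt]
        omega
      have hd2 : decide (i + 1 < lines.length) = false := by
        simp only [decide_eq_false_iff_not, not_lt]
        omega
      rw [h1, hd, hd2]
      simp only [Bool.and_false, Bool.false_and, Bool.false_eq_true, if_false]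
  · rw [Bool.not_eq_true] at h1
    rw [h1]
    simp only [Bool.false_and, Bool.false_eq_true, if_false]

-- A's foldl over enumerate, from index i, equals aRec
theorem foldA (lines : List (List Char)) :
    ∀ (fuel i : Nat), lines.length - i ≤ fuel → ∀ (acc : List (List Char)) (skip : Bool),
      ((PySem.List.enumerate (lines.drop i) (i : Int)).foldl (stepA lines) (acc, skip)).1
        = acc ++ aRec lines skip i := by
  intro fuel
  induction fuel with
  | zero =>
    intro i hf acc skip
    rw [List.drop_eq_nil_of_le (by omega), PySem.List.enumerate_nil, List.foldl_nil]
    rw [aRec, dif_neg (by omega), List.append_nil]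
  | succ fuel ih =>
    intro i hf acc skip
    by_cases hi : i < lines.length
    · have hd : lines.drop i = lines[i] :: lines.drop (i + 1) :=
        List.drop_eq_getElem_cons hi
      have hg : lines[i] = lines.getD i [] := (List.getD_eq_getElem lines [] hi).symm
      rw [hd, hg, PySem.List.enumerate_cons, List.foldl_cons]
      rw [stepA_eq lines i hi acc skip]
      rw [show ((i : Int) + 1) = ((i + 1 : Nat) : Int) by push_cast; ring]
      rw [aRec, dif_pos hi]
      by_cases ht : trigB lines i = true
      · rw [ht, if_pos rfl, if_pos rfl, ih (i + 1) (by omega)]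
      · rw [Bool.not_eq_true] at ht
        rw [ht, if_neg Bool.false_ne_true, if_neg Bool.false_ne_true]
        cases skip with
        | false =>
          simp only [Bool.not_false, if_true]
          rw [ih (i + 1) (by omega)]
          simp
        | true =>
          simp only [Bool.not_true, Bool.false_eq_true, if_false]
          by_cases hb : (PySem.Chars.strip (lines.getD i []) == ([] : List Char)) = true
          · rw [if_pos hb, show blankI lines i = true from hb, if_pos rfl, ih (i + 1) (by omega)]
          · rw [if_neg hb, show blankI lines i = false from Bool.not_eq_true _ |>.mp hb]
            rw [if_neg Bool.false_ne_true, ih (i + 1) (by omega)]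
    · rw [List.drop_eq_nil_of_le (by omega), PySem.List.enumerate_nil, List.foldl_nil]
      rw [aRec, dif_neg (by omega), List.append_nil]

-- ===== B-side proof devices =====

-- pass 1 of B, rewritten as a recursion over the index (proof device)
def segsOut (lines : List (List Char)) (j : Nat) (cur : List Nat) : List (List Nat) :=
  if _h : j < lines.length then
    if blankI lines j then (cur ++ [j]) :: segsOut lines (j + 1) []
    else segsOut lines (j + 1) (cur ++ [j])
  else if cur.isEmpty then [] else [cur]
termination_by lines.length - j
decreasing_by all_goals omega

-- pass 1's fold equals segsOut
def step1 (lines : List (List Char)) (st : List (List Nat) × List Nat) (i : Nat) :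
    List (List Nat) × List Nat :=
  let cur := st.2 ++ [i]
  if PySem.Chars.strip (lines.getD i []) == ([] : List Char) then (st.1 ++ [cur], ([] : List Nat))
  else (st.1, cur)

theorem step1_eq (lines : List (List Char)) (st : List (List Nat) × List Nat) (i : Nat) :
    step1 lines st i =
      (if blankI lines i then (st.1 ++ [st.2 ++ [i]], ([] : List Nat)) else (st.1, st.2 ++ [i])) := by
  unfold step1 blankI
  rfl

theorem fold1_eq (lines : List (List Char)) :
    ∀ (fuel j : Nat), lines.length - j ≤ fuel → ∀ (acc : List (List Nat)) (cur : List Nat),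
      (if ((List.range' j (lines.length - j)).foldl (step1 lines) (acc, cur)).2.isEmpty
       then ((List.range' j (lines.length - j)).foldl (step1 lines) (acc, cur)).1
       else ((List.range' j (lines.length - j)).foldl (step1 lines) (acc, cur)).1
         ++ [((List.range' j (lines.length - j)).foldl (step1 lines) (acc, cur)).2])
      = acc ++ segsOut lines j cur := by
  intro fuel
  induction fuel with
  | zero =>
    intro j hf acc cur
    rw [show lines.length - j = 0 by omega]
    rw [segsOut, dif_neg (by omega)]
    simp only [List.range'_zero, List.foldl_nil]
    cases cur with
    | nil => simp
    | cons c cs => simp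
  | succ fuel ih =>
    intro j hf acc cur
    by_cases hj : j < lines.length
    · rw [show lines.length - j = (lines.length - (j + 1)) + 1 by omega]
      rw [show List.range' j ((lines.length - (j + 1)) + 1)
          = j :: List.range' (j + 1) (lines.length - (j + 1)) from rfl]
      rw [List.foldl_cons, step1_eq]
      rw [segsOut, dif_pos hj]
      by_cases hb : blankI lines j = true
      · rw [hb, if_pos rfl, if_pos rfl]
        have := ih (j + 1) (by omega) (acc ++ [cur ++ [j]]) []
        rw [show lines.length - (j + 1) = lines.length - (j + 1) from rfl] at this
        rw [this]
        simp
      · have hb' : blankI lines j = false := Bool.not_eq_true _ |>.mp hb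
        rw [hb', if_neg Bool.false_ne_true, if_neg Bool.false_ne_true]
        exact ih (j + 1) (by omega) acc (cur ++ [j])
    · rw [show lines.length - j = 0 by omega]
      rw [segsOut, dif_neg (by omega)]
      simp only [List.range'_zero, List.foldl_nil]
      cases cur with
      | nil => simp
      | cons c cs => simp

-- pass 2's fold is a flatMap
theorem fold2_eq (f : List Nat → List (List Char)) :
    ∀ (segs : List (List Nat)) (acc : List (List Char)),
      segs.foldl (fun out seg => out ++ f seg) acc = acc ++ segs.flatMap f := by
  intro segs
  induction segs with
  | nil => intro acc; simp
  | cons s ss ih => intro acc; simp [ih]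

-- at the blank (or the end of file) that closes a segment, A leaves skip mode
theorem skip_base (lines : List (List Char)) (b : Nat) (hbn : b ≤ lines.length)
    (hend : b = lines.length ∨ (b < lines.length ∧ blankI lines b = true)) :
    aRec lines true b = aRec lines false (b + 1) := by
  rcases hend with h | ⟨hb, hbl⟩
  · subst h
    rw [aRec, dif_neg (by omega), aRec, dif_neg (by omega)]
  · rw [aRec, dif_pos hb, blank_trigB_false lines b hbl, if_neg Bool.false_ne_true]
    simp only [Bool.not_true, Bool.false_eq_true, if_false]
    rw [hbl, if_pos rfl]

-- skip mode of A runs to just past the blank that ends the current segment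
theorem skip_run (lines : List (List Char)) :
    ∀ (fuel k b : Nat), b - k ≤ fuel → k ≤ b → b ≤ lines.length →
      (∀ m, k ≤ m → m < b → blankI lines m = false) →
      (b = lines.length ∨ (b < lines.length ∧ blankI lines b = true)) →
      aRec lines true k = aRec lines false (b + 1) := by
  intro fuel
  induction fuel with
  | zero =>
    intro k b hf hkb hbn _ hend
    have hkb' : k = b := by omega
    subst hkb'
    exact skip_base lines k hbn hend
  | succ fuel ih =>
    intro k b hf hkb hbn hnb hend
    by_cases hkb' : k = b
    · subst hkb'
      exact skip_base lines k hbn hend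
    · have hk : k < b := by omega
      have hkl : k < lines.length := by omega
      have hnbk : blankI lines k = false := hnb k (le_refl k) hk
      rw [aRec, dif_pos hkl]
      by_cases ht : trigB lines k = true
      · rw [ht, if_pos rfl]
        exact ih (k + 1) b (by omega) (by omega) hbn (fun m h1 h2 => hnb m (by omega) h2) hend
      · rw [Bool.not_eq_true] at ht
        rw [ht, if_neg Bool.false_ne_true]
        simp only [Bool.not_true, Bool.false_eq_true, if_false]
        rw [hnbk, if_neg Bool.false_ne_true]
        exact ih (k + 1) b (by omega) (by omega) hbn (fun m h1 h2 => hnb m (by omega) h2) hend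

-- base of the within-segment scan: the closing blank itself (or the end of file)
theorem seg_base (lines : List (List Char)) (b : Nat) (hbn : b ≤ lines.length)
    (hend : b = lines.length ∨ (b < lines.length ∧ blankI lines b = true)) :
    aRec lines false b =
      ((List.range' b (min (b + 1) lines.length - b)).takeWhile
          (fun i => !trigB lines i)).map (fun i => lines.getD i [])
        ++ aRec lines false (b + 1) := by
  rcases hend with h | ⟨hb, hbl⟩
  · subst h
    rw [show min (lines.length + 1) lines.length - lines.length = 0 by omega]
    rw [aRec, dif_neg (by omega)]
    simp only [List.range'_zero, List.takeWhile_nil, List.map_nil, List.nil_append]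
    rw [aRec, dif_neg (by omega)]
  · rw [show min (b + 1) lines.length - b = 1 by omega]
    rw [aRec, dif_pos hb, blank_trigB_false lines b hbl, if_neg Bool.false_ne_true]
    simp only [Bool.not_false, if_true]
    rw [show List.range' b 1 = [b] from rfl]
    rw [List.takeWhile_cons, blank_trigB_false lines b hbl]
    simp

-- within one segment [s..b], A's scan is exactly 'take while not triggered', then resume after b
theorem seg_run (lines : List (List Char)) :
    ∀ (fuel s b : Nat), b - s ≤ fuel → s ≤ b → b ≤ lines.length →
      (∀ m, s ≤ m → m < b → blankI lines m = false) →
      (b = lines.length ∨ (b < lines.length ∧ blankI lines b = true)) →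
      aRec lines false s =
        ((List.range' s (min (b + 1) lines.length - s)).takeWhile
            (fun i => !trigB lines i)).map (fun i => lines.getD i [])
          ++ aRec lines false (b + 1) := by
  intro fuel
  induction fuel with
  | zero =>
    intro s b hf hsb hbn _ hend
    have hsb' : s = b := by omega
    subst hsb'
    exact seg_base lines s hbn hend
  | succ fuel ih =>
    intro s b hf hsb hbn hnb hend
    by_cases hsb' : s = b
    · subst hsb'
      exact seg_base lines s hbn hend
    · have hs : s < b := by omega
      have hsl : s < lines.length := by omega
      have hm : min (b + 1) lines.length - s = (min (b + 1) lines.length - (s + 1)) + 1 := by omega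
      rw [hm]
      rw [show List.range' s ((min (b + 1) lines.length - (s + 1)) + 1)
          = s :: List.range' (s + 1) (min (b + 1) lines.length - (s + 1)) from rfl]
      rw [List.takeWhile_cons]
      rw [aRec, dif_pos hsl]
      by_cases ht : trigB lines s = true
      · rw [ht, if_pos rfl]
        simp only [Bool.not_true, Bool.false_eq_true, if_false, List.map_nil, List.nil_append]
        exact skip_run lines (b - (s + 1)) (s + 1) b (by omega) (by omega) hbn
          (fun m h1 h2 => hnb m (by omega) h2) hend
      · rw [Bool.not_eq_true] at ht
        rw [ht, if_neg Bool.false_ne_true]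
        simp only [Bool.not_false, if_true, List.map_cons, List.cons_append]
        rw [ih (s + 1) b (by omega) (by omega) hbn (fun m h1 h2 => hnb m (by omega) h2) hend]

-- pass 2 applied to the remaining segments: base case, the scan has reached the end of the file
theorem main_base (lines : List (List Char)) (s : Nat) (hs : s ≤ lines.length)
    (hnb : ∀ m, s ≤ m → m < lines.length → blankI lines m = false) :
    (segsOut lines lines.length (List.range' s (lines.length - s))).flatMap
        (fun seg => (seg.takeWhile (fun i => !trigB lines i)).map (fun i => lines.getD i []))
      = aRec lines false s := by
  rw [segsOut, dif_neg (by omega)]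
  by_cases hseq : s = lines.length
  · rw [show lines.length - s = 0 by omega]
    simp only [List.range'_zero, List.isEmpty_nil, if_pos trivial, List.flatMap_nil]
    rw [aRec, dif_neg (by omega)]
  · have hs' : s < lines.length := by omega
    have hne : (List.range' s (lines.length - s)).isEmpty = false := by
      simp [List.range'_eq_nil_iff]
      omega
    rw [hne, if_neg Bool.false_ne_true]
    simp only [List.flatMap_cons, List.flatMap_nil, List.append_nil]
    have hsr := seg_run lines (lines.length - s) s lines.length (by omega) (by omega) (le_refl _)
      hnb (Or.inl rfl)
    rw [hsr]
    rw [show min (lines.length + 1) lines.length = lines.length by omega]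
    rw [show aRec lines false (lines.length + 1) = [] by rw [aRec, dif_neg (by omega)]]
    rw [List.append_nil]

-- pass 2 applied to the remaining segments reproduces A's scan
theorem main_run (lines : List (List Char)) :
    ∀ (fuel j s : Nat), lines.length - j ≤ fuel → s ≤ j → j ≤ lines.length →
      (∀ m, s ≤ m → m < j → blankI lines m = false) →
      (segsOut lines j (List.range' s (j - s))).flatMap
          (fun seg => (seg.takeWhile (fun i => !trigB lines i)).map (fun i => lines.getD i []))
        = aRec lines false s := by
  intro fuel
  induction fuel with
  | zero =>
    intro j s hf hsj hjn hnb
    have hj : j = lines.length := by omega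
    subst hj
    exact main_base lines s hsj hnb
  | succ fuel ih =>
    intro j s hf hsj hjn hnb
    by_cases hj : j < lines.length
    · rw [segsOut, dif_pos hj]
      have hcur : List.range' s (j - s) ++ [j] = List.range' s (j + 1 - s) := by
        rw [show j + 1 - s = (j - s) + 1 by omega, List.range'_concat]
        congr 2
        omega
      by_cases hb : blankI lines j = true
      · rw [hb, if_pos rfl]
        simp only [List.flatMap_cons]
        rw [hcur]
        have hrest := ih (j + 1) (j + 1) (by omega) (le_refl _) (by omega) (by omega)
        rw [show j + 1 - (j + 1) = 0 by omega] at hrest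
        simp only [List.range'_zero] at hrest
        rw [hrest]
        have hsr := seg_run lines (j - s) s j (by omega) (by omega) (by omega) hnb
          (Or.inr ⟨hj, hb⟩)
        rw [hsr]
        rw [show min (j + 1) lines.length = j + 1 by omega]
      · have hb' : blankI lines j = false := Bool.not_eq_true _ |>.mp hb
        rw [hb', if_neg Bool.false_ne_true]
        rw [hcur]
        exact ih (j + 1) s (by omega) (by omega) (by omega)
          (fun m h1 h2 => by
            by_cases hm : m = j
            · subst hm; exact hb'
            · exact hnb m h1 (by omega))
    · have hj' : j = lines.length := by omega
      subst hj'
      exact main_base lines s hsj hnb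

-- ===== VERDICT (by name: the statement is the Claim_ definition above) =====
theorem remove_dead_code_py_spec : Claim_equal_remove_dead_code_py := by
  intro content _
  unfold Spec_remove_dead_code_py remove_dead_code_py remove_dead_code_py_alt
  set lines := splitKeep [] content.toList with hlines
  -- state both sides with the named proof devices (definitionally equal to the ports' bodies)
  show String.ofList (PySem.Chars.join []
      ((PySem.List.enumerate lines 0).foldl (stepA lines) (([] : List (List Char)), false)).1)
    = String.ofList (PySem.Chars.join []
      ((if ((List.range lines.length).foldl (step1 lines) (([] : List (List Nat)), ([] : List Nat))).2.isEmpty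
        then ((List.range lines.length).foldl (step1 lines) (([] : List (List Nat)), ([] : List Nat))).1
        else ((List.range lines.length).foldl (step1 lines) (([] : List (List Nat)), ([] : List Nat))).1
          ++ [((List.range lines.length).foldl (step1 lines) (([] : List (List Nat)), ([] : List Nat))).2]).foldl
        (fun out seg => out ++ (seg.takeWhile (fun i => !headsDead lines i)).map
          (fun i => lines.getD i [])) ([] : List (List Char))))
  -- A's side: the fold is aRec false 0
  have h0 := foldA lines lines.length 0 (by omega) [] false
  rw [List.drop_zero, Nat.cast_zero] at h0
  rw [h0, List.nil_append]
  -- B's side: pass 1 equals segsOut, pass 2 equals a flatMap, and together they give aRec false 0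
  have h1 := fold1_eq lines lines.length 0 (by omega) [] []
  simp only [Nat.sub_zero, List.nil_append] at h1
  rw [List.range_eq_range']
  rw [h1]
  rw [fold2_eq]
  rw [List.nil_append]
  have hfun : (fun i => !headsDead lines i) = (fun i => !trigB lines i) := by
    funext i
    rw [headsDead_eq]
  rw [hfun]
  have h2 := main_run lines lines.length 0 0 (by omega) (le_refl 0) (Nat.zero_le _)
    (by intro m _ hm; exact absurd hm (by omega))
  rw [show (0 : Nat) - 0 = 0 from rfl] at h2
  simp only [List.range'_zero] at h2
  rw [h2]
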